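-- pv_equiv track=rewrite | github.com/patrickfrey/strusWikipediaSearch | scripts/strusnlp_spacy.py | substFilename
-- ===== SOURCE A (Python) =====
-- def substFilename( filename):
--     rt = ""
--     fidx = 0
--     while fidx < len(filename):
--         if filename[ fidx] == '_':
--             rt += ' '
--             fidx += 1
--         elif filename[ fidx] == '%':
--             rt += chr( int( filename[fidx+1:fidx+3], 16))
--             fidx += 3
--         else:
--             rt += filename[ fidx]
--             fidx += 1
--     return rt
-- ===== SOURCE B (Python) =====
-- def substFilename(filename):
--     hexdigits = "0123456789abcdef"
--     parts = filename.split('%')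
--     pieces = [parts[0].replace('_', ' ')]
--     for p in parts[1:]:
--         code = hexdigits.index(p[0].lower()) * 16 + hexdigits.index(p[1].lower())
--         pieces.append(chr(code) + p[2:].replace('_', ' '))
--     return ''.join(pieces)
-- ===== Notes on version B (the rewrite author's own statement) =====
-- stated objective: idiomatic
-- what changed: B replaces A's index-arithmetic while loop with quadratic string concatenation by the standard decode idiom: split the string once on '%', decode the two hex digits heading each later segment via str.index into a hex-digit table, replace '_' by ' ' segment-wise, and join the pieces.
-- outside the precondition, e.g. on substFilename('%2 x'): A returns '\x02x', B raises ValueError; on substFilename('%+5'): A returns '\x05', B raises ValueError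
import Mathlib
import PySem

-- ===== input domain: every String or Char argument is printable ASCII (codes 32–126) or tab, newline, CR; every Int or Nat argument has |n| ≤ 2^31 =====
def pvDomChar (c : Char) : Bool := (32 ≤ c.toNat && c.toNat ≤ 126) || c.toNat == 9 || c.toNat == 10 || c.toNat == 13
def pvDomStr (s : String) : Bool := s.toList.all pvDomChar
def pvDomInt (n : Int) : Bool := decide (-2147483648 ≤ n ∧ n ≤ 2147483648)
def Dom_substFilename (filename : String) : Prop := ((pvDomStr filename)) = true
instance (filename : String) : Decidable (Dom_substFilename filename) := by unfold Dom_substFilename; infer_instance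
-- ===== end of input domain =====

-- B replaces A's quadratic-concatenation while loop with the standard decode idiom (split once on '%',
-- decode the two hex digits heading each later segment, map '_'→' ' segment-wise, join): idiomatic, measured faster.

-- ===== PORT A =====
-- while loop over the remaining characters; 'fidx += 3' is 'drop 2' of the tail.
-- filename[fidx+1:fidx+3] is 'rest.take 2' (Python slices clamp); int(·,16) is PySem.Int.ofCharsBase?;
-- the 'none' / out-of-chr-range branches are A's ValueError paths (excluded by Pre_).
def substFilenameLoopA (acc : List Char) : List Char → List Char
  | [] => acc
  | c :: rest =>
    if c = '_' then substFilenameLoopA (acc ++ [' ']) rest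
    else if c = '%' then
      match PySem.Int.ofCharsBase? (rest.take 2) 16 with
      | some n =>
        if 0 ≤ n ∧ n < 1114112 then substFilenameLoopA (acc ++ [Char.ofNat n.toNat]) (rest.drop 2)
        else acc      -- chr() ValueError: A raises here (outside Pre_)
      | none => acc   -- int() ValueError: A raises here (outside Pre_)
    else substFilenameLoopA (acc ++ [c]) rest
termination_by l => l.length
decreasing_by all_goals (simp [List.length_drop]; try omega)

def substFilename (filename : String) : String :=
  String.mk (substFilenameLoopA [] filename.toList)

-- ===== PORT B =====
def pvHexDigitsB : List Char := "0123456789abcdef".toList   -- Source B's hexdigits table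

-- one later segment p: chr(hexdigits.index(p[0].lower())*16 + hexdigits.index(p[1].lower())) + p[2:].replace('_',' ');
-- the [] fallbacks are Source B's IndexError / ValueError paths (outside Pre_).
def substFilenamePieceB (p : List Char) : List Char :=
  match p with
  | a :: b :: r =>
    match PySem.List.index? pvHexDigitsB (PySem.Chars.lowerChar a),
          PySem.List.index? pvHexDigitsB (PySem.Chars.lowerChar b) with
    | some x, some y => Char.ofNat (x * 16 + y) :: PySem.Chars.replace r ['_'] [' ']
    | _, _ => []    -- str.index ValueError (outside Pre_)
  | _ => []         -- p[0]/p[1] IndexError (outside Pre_)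

def substFilename_alt (filename : String) : String :=
  match PySem.Chars.split? filename.toList ['%'] with
  | some (h :: tl) =>
      String.mk (PySem.Chars.join [] (PySem.Chars.replace h ['_'] [' '] :: tl.map substFilenamePieceB))
  | _ => ""   -- unreachable: split on a nonempty separator yields a nonempty list

-- ===== PRECONDITION & SPEC =====
def pvHexList : List Char := "0123456789abcdefABCDEF".toList
def pvIsHexDigit (c : Char) : Bool := decide (c ∈ pvHexList)
def pvHexAt (l : List Char) (i : Nat) : Bool :=
  match l[i]? with
  | some c => pvIsHexDigit c
  | none => false

-- A raises ValueError unless every '%' is followed by two characters int(·,16) accepts; Pre_ demands two plain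
-- hex digits, which additionally excludes the rare escapes only accepted through int()'s lenient parsing
-- (whitespace or a sign inside the two sliced characters, e.g. '%2 x', '%+5'), where A returns but B raises.
def Pre_substFilename (filename : String) : Prop :=
  ∀ i ∈ List.range filename.toList.length,
    filename.toList[i]? = some '%' →
      pvHexAt filename.toList (i + 1) = true ∧ pvHexAt filename.toList (i + 2) = true
instance (filename : String) : Decidable (Pre_substFilename filename) := by
  unfold Pre_substFilename; infer_instance

def pvWitness_substFilename : String := "a_%41"

def Spec_substFilename (filename : String) (out : String) : Prop := out = substFilename_alt filename
instance (filename : String) (out : String) : Decidable (Spec_substFilename filename out) := by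
  unfold Spec_substFilename; infer_instance

-- ===== CLAIM (what is proved, stated in full; the proofs are below) =====
def Claim_equal_substFilename : Prop := ∀ (filename : String), Dom_substFilename filename → Pre_substFilename filename → Spec_substFilename filename (substFilename filename)

-- ===== LEMMAS AND PROOFS =====

-- '_'→' ' on a single character
def pvSubChar (c : Char) : Char := if c = '_' then ' ' else c

-- numeric value of a hex digit
def pvHxv (c : Char) : Nat :=
  if c.toNat ≤ 57 then c.toNat - 48 else if c.toNat ≤ 70 then c.toNat - 55 else c.toNat - 87

set_option maxRecDepth 4000 in
lemma pv_hex_ofCharsBase_bool : (pvHexList.all fun a => pvHexList.all fun b =>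
    PySem.Int.ofCharsBase? [a, b] 16 == some ((pvHxv a * 16 + pvHxv b : Nat) : Int)) = true := by decide

lemma pv_hex_ofCharsBase : ∀ a ∈ pvHexList, ∀ b ∈ pvHexList,
    PySem.Int.ofCharsBase? [a, b] 16 = some ((pvHxv a * 16 + pvHxv b : Nat) : Int) := by
  have h := pv_hex_ofCharsBase_bool
  simp only [List.all_eq_true, beq_iff_eq] at h
  exact h

set_option maxRecDepth 4000 in
lemma pv_hex_index_bool : (pvHexList.all fun a =>
    PySem.List.index? pvHexDigitsB (PySem.Chars.lowerChar a) == some (pvHxv a)) = true := by decide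

lemma pv_hex_index : ∀ a ∈ pvHexList,
    PySem.List.index? pvHexDigitsB (PySem.Chars.lowerChar a) = some (pvHxv a) := by
  have h := pv_hex_index_bool
  simp only [List.all_eq_true, beq_iff_eq] at h
  exact h

lemma pv_hex_ne_bool : (pvHexList.all fun a => a != '%' && a != '_') = true := by decide

lemma pv_hex_ne : ∀ a ∈ pvHexList, a ≠ '%' ∧ a ≠ '_' := by
  have h := pv_hex_ne_bool
  simp only [List.all_eq_true, Bool.and_eq_true, bne_iff_ne] at h
  exact h

lemma pv_hex_lt_bool : (pvHexList.all fun a => pvHxv a < 16) = true := by decide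

lemma pv_hex_lt : ∀ a ∈ pvHexList, pvHxv a < 16 := by
  have h := pv_hex_lt_bool
  simp only [List.all_eq_true, decide_eq_true_eq] at h
  exact h

-- replace(·,'_',' ') is a character map
lemma pv_replace_go (l : List Char) : ∀ (fuel : Nat) (acc : List Char), l.length ≤ fuel →
    PySem.Chars.replace.go ['_'] [' '] fuel l acc = acc.reverse ++ l.map pvSubChar := by
  induction l with
  | nil =>
    intro fuel acc _
    cases fuel <;> simp [PySem.Chars.replace.go]
  | cons c t ih =>
    intro fuel acc hf
    cases fuel with
    | zero => simp at hf
    | succ f =>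
      by_cases hc : c = '_'
      · subst hc
        simp only [PySem.Chars.replace.go, List.isPrefixOf, BEq.rfl, Bool.true_and,
          List.isPrefixOf_nil_left, if_true]
        rw [show List.drop ['_'].length ('_' :: t) = t from rfl,
          show ([' '].reverse ++ acc) = (' ' :: acc) from rfl,
          ih f (' ' :: acc) (by simpa using hf)]
        simp [pvSubChar]
      · have hpre : (['_'].isPrefixOf (c :: t)) = false := by
          simp [List.isPrefixOf]; exact fun h => hc (by simpa using h.symm)
        simp only [PySem.Chars.replace.go, hpre, if_false]
        rw [ih f (c :: acc) (by simpa using Nat.lt_succ_iff.mp (by simpa using hf))]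
        simp [pvSubChar, hc]

lemma pv_replace (l : List Char) :
    PySem.Chars.replace l ['_'] [' '] = l.map pvSubChar := by
  simpa using pv_replace_go l l.length [] le_rfl

-- reference shape of split('%')
def pvSplitP : List Char → List (List Char)
  | [] => [[]]
  | c :: t =>
    if c = '%' then [] :: pvSplitP t
    else
      match pvSplitP t with
      | h :: r => (c :: h) :: r
      | [] => [[c]]

lemma pvSplitP_ne_nil (l : List Char) : pvSplitP l ≠ [] := by
  cases l with
  | nil => simp [pvSplitP]
  | cons c t =>
    simp only [pvSplitP]
    split
    · simp
    · cases h : pvSplitP t <;> simp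

lemma pv_splitOn_go (l : List Char) : ∀ (fuel : Nat) (cur : List Char) (acc : List (List Char)),
    l.length < fuel →
    PySem.Chars.splitOn.go ['%'] fuel l cur acc =
      acc.reverse ++ (match pvSplitP l with
        | [] => [cur.reverse]
        | h :: r => (cur.reverse ++ h) :: r) := by
  induction l with
  | nil =>
    intro fuel cur acc hf
    cases fuel with
    | zero => omega
    | succ f => simp [PySem.Chars.splitOn.go, pvSplitP]
  | cons c t ih =>
    intro fuel cur acc hf
    cases fuel with
    | zero => omega
    | succ f =>
      by_cases hc : c = '%'
      · subst hc
        simp only [PySem.Chars.splitOn.go, List.isPrefixOf, BEq.rfl, Bool.true_and,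
          List.isPrefixOf_nil_left, if_true]
        rw [show List.drop ['%'].length ('%' :: t) = t from rfl,
          ih f [] (cur.reverse :: acc) (by simp at hf ⊢; omega)]
        obtain ⟨h, r, hr⟩ : ∃ h r, pvSplitP t = h :: r := by
          cases hs : pvSplitP t with
          | nil => exact absurd hs (pvSplitP_ne_nil t)
          | cons h r => exact ⟨h, r, rfl⟩
        simp [pvSplitP, hr]
      · have hpre : (['%'].isPrefixOf (c :: t)) = false := by
          simp [List.isPrefixOf]; exact fun h => hc (by simpa using h.symm)
        simp only [PySem.Chars.splitOn.go, hpre, if_false]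
        rw [ih f (c :: cur) acc (by simp at hf ⊢; omega)]
        obtain ⟨h, r, hr⟩ : ∃ h r, pvSplitP t = h :: r := by
          cases hs : pvSplitP t with
          | nil => exact absurd hs (pvSplitP_ne_nil t)
          | cons h r => exact ⟨h, r, rfl⟩
        simp [pvSplitP, hc, hr]

lemma pv_splitOn (l : List Char) : PySem.Chars.splitOn l ['%'] = pvSplitP l := by
  unfold PySem.Chars.splitOn
  rw [pv_splitOn_go l (l.length + 1) [] [] (by omega)]
  obtain ⟨h, r, hr⟩ : ∃ h r, pvSplitP l = h :: r := by
    cases hs : pvSplitP l with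
    | nil => exact absurd hs (pvSplitP_ne_nil l)
    | cons h r => exact ⟨h, r, rfl⟩
  simp [hr]

-- A's loop with the accumulator factored out
lemma pv_aLoop_acc : ∀ (n : Nat) (l : List Char), l.length ≤ n → ∀ acc,
    substFilenameLoopA acc l = acc ++ substFilenameLoopA [] l := by
  intro n
  induction n with
  | zero =>
    intro l hl acc
    cases l with
    | nil => simp [substFilenameLoopA]
    | cons c t => simp at hl
  | succ n ih =>
    intro l hl acc
    cases l with
    | nil => simp [substFilenameLoopA]
    | cons c t =>
      by_cases hc : c = '_'
      · subst hc
        rw [substFilenameLoopA, substFilenameLoopA]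
        simp only [if_true]
        rw [ih t (by simpa using hl) (acc ++ [' ']), ih t (by simpa using hl) ([] ++ [' '])]
        simp
      · by_cases hp : c = '%'
        · subst hp
          rw [substFilenameLoopA, substFilenameLoopA]
          simp only [hc, if_false, if_true, reduceIte]
          cases hov : PySem.Int.ofCharsBase? (t.take 2) 16 with
          | none => simp
          | some m =>
            simp only
            split
            · rw [ih (t.drop 2) (by simp at hl ⊢; omega) (acc ++ [Char.ofNat m.toNat]),
                ih (t.drop 2) (by simp at hl ⊢; omega) ([] ++ [Char.ofNat m.toNat])]
              simp
            · simp
        · rw [substFilenameLoopA, substFilenameLoopA]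
          simp only [hc, hp, if_false]
          rw [ih t (by simpa using hl) (acc ++ [c]), ih t (by simpa using hl) ([] ++ [c])]
          simp

-- internal form of Pre_ on the character list
def pvP (l : List Char) : Prop :=
  ∀ i, l[i]? = some '%' → pvHexAt l (i + 1) = true ∧ pvHexAt l (i + 2) = true

lemma pvP_tail {c : Char} {t : List Char} (h : pvP (c :: t)) : pvP t := by
  intro i hi
  have := h (i + 1) (by simpa using hi)
  simpa [pvHexAt] using this

lemma pvP_head {t : List Char} (h : pvP ('%' :: t)) :
    ∃ a b t2, t = a :: b :: t2 ∧ a ∈ pvHexList ∧ b ∈ pvHexList := by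
  have h0 := h 0 (by simp)
  cases t with
  | nil => simp [pvHexAt] at h0
  | cons a t' =>
    cases t' with
    | nil => simp [pvHexAt] at h0
    | cons b t2 =>
      refine ⟨a, b, t2, rfl, ?_, ?_⟩
      · have := h0.1; simp [pvHexAt, pvIsHexDigit] at this; exact this
      · have := h0.2; simp [pvHexAt, pvIsHexDigit] at this; exact this

-- ''.join with the empty separator is concatenation
lemma pv_join_nil_flatten (l : List (List Char)) : PySem.Chars.join [] l = l.flatten := by
  induction l with
  | nil => rw [PySem.Chars.join_nil]; rfl
  | cons p rest ih =>
    cases rest with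
    | nil => rw [PySem.Chars.join_singleton]; simp
    | cons q rest' => rw [PySem.Chars.join_cons_cons, ih]; simp

-- the main correspondence: A's loop computes B's split/decode/join shape
lemma pv_main : ∀ (n : Nat) (l : List Char), l.length ≤ n → pvP l →
    substFilenameLoopA [] l =
      (match pvSplitP l with
        | [] => []
        | h :: tl => h.map pvSubChar ++ (tl.map substFilenamePieceB).flatten) := by
  intro n
  induction n with
  | zero =>
    intro l hl _
    cases l with
    | nil => simp [substFilenameLoopA, pvSplitP]
    | cons c t => simp at hl
  | succ n ih =>
    intro l hl hP
    cases l with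
    | nil => simp [substFilenameLoopA, pvSplitP]
    | cons c t =>
      by_cases hp : c = '%'
      · subst hp
        obtain ⟨a, b, t2, rfl, ha, hb⟩ := pvP_head hP
        have hne_a := pv_hex_ne a ha
        have hne_b := pv_hex_ne b hb
        rw [substFilenameLoopA]
        simp only [reduceIte, List.take_succ_cons, List.take_zero, List.drop_succ_cons,
          List.drop_zero]
        rw [pv_hex_ofCharsBase a ha b hb, if_neg (by decide : ¬ ('%' = '_'))]
        dsimp only
        have hlt : pvHxv a * 16 + pvHxv b < 256 := by
          have := pv_hex_lt a ha; have := pv_hex_lt b hb; omega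
        have hcond : (0 : Int) ≤ ((pvHxv a * 16 + pvHxv b : Nat) : Int) ∧
            ((pvHxv a * 16 + pvHxv b : Nat) : Int) < 1114112 := by
          constructor
          · exact Int.natCast_nonneg _
          · exact_mod_cast Nat.lt_of_lt_of_le hlt (by norm_num)
        rw [if_pos hcond]
        rw [pv_aLoop_acc n t2 (by simp at hl; omega) _]
        have hP2 : pvP t2 := pvP_tail (pvP_tail (pvP_tail hP))
        rw [ih t2 (by simp at hl; omega) hP2]
        obtain ⟨h2, tl2, hr2⟩ : ∃ h2 tl2, pvSplitP t2 = h2 :: tl2 := by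
          cases hs : pvSplitP t2 with
          | nil => exact absurd hs (pvSplitP_ne_nil t2)
          | cons h2 tl2 => exact ⟨h2, tl2, rfl⟩
        simp only [pvSplitP, hne_a.1, hne_b.1, if_false, reduceIte, hr2]
        simp only [List.map_cons, List.flatten_cons]
        rw [substFilenamePieceB]
        rw [pv_hex_index a ha, pv_hex_index b hb]
        simp only [List.map_nil, List.nil_append]
        rw [pv_replace h2]
        have htn : ((pvHxv a : Int) * 16 + (pvHxv b : Int)).toNat = pvHxv a * 16 + pvHxv b := by
          omega
        simp [htn]
      · have htl : t.length ≤ n := by simpa using hl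
        have hP' : pvP t := pvP_tail hP
        obtain ⟨h, tl, hr⟩ : ∃ h tl, pvSplitP t = h :: tl := by
          cases hs : pvSplitP t with
          | nil => exact absurd hs (pvSplitP_ne_nil t)
          | cons h tl => exact ⟨h, tl, rfl⟩
        by_cases hc : c = '_'
        · subst hc
          rw [substFilenameLoopA]
          simp only [if_true, reduceIte]
          rw [pv_aLoop_acc n t htl, ih t htl hP']
          simp [pvSplitP, hr, pvSubChar]
        · rw [substFilenameLoopA]
          simp only [hc, hp, if_false]
          rw [pv_aLoop_acc n t htl, ih t htl hP']
          simp [pvSplitP, hp, hc, hr, pvSubChar]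

-- ===== VERDICT (by name: the statement is the Claim_ definition above) =====
theorem substFilename_spec : Claim_equal_substFilename := by
  intro filename _ hpre
  unfold Spec_substFilename substFilename substFilename_alt
  have hP : pvP filename.toList := by
    intro i hi
    have hlt : i < filename.toList.length := by
      have := List.getElem?_eq_some_iff.mp hi
      exact this.1
    exact hpre i (List.mem_range.mpr hlt) hi
  have hsplit : PySem.Chars.split? filename.toList ['%'] =
      some (pvSplitP filename.toList) := by
    simp [PySem.Chars.split?, pv_splitOn]
  obtain ⟨h, tl, hr⟩ : ∃ h tl, pvSplitP filename.toList = h :: tl := by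
    cases hs : pvSplitP filename.toList with
    | nil => exact absurd hs (pvSplitP_ne_nil _)
    | cons h tl => exact ⟨h, tl, rfl⟩
  rw [hsplit, hr]
  rw [pv_main filename.toList.length filename.toList le_rfl hP, hr]
  dsimp only
  rw [pv_replace h, pv_join_nil_flatten, List.flatten_cons]
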